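-- pv_equiv track=rewrite | github.com/gherwt/TIL | kDT30/algorithms/Prgms/daily/day7/7-1.py | solution
-- ===== SOURCE A (Python) =====
-- def solution(arr):
--     stk = []
--     i = 0
--     while i < len(arr):
--         if len(stk) == 0:
--             stk.append(arr[i])
--             i += 1
--         elif arr[i] > stk[-1]:
--             stk.append(arr[i])
--             i += 1
--         elif stk[-1] >= arr[i]:
--             stk.pop()
--
--     return stk
-- ===== SOURCE B (Python) =====
-- def solution(arr):
--     out = []
--     cur_min = None
--     for x in reversed(arr):
--         if cur_min is None or x < cur_min:
--             out.append(x)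
--             cur_min = x
--     out.reverse()
--     return out
-- ===== Notes on version B (the rewrite author's own statement) =====
-- stated objective: simpler
-- what changed: Replaces the left-to-right push/pop monotonic-stack loop with a single right-to-left scan that records each new running minimum and reverses the record.
import Mathlib
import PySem

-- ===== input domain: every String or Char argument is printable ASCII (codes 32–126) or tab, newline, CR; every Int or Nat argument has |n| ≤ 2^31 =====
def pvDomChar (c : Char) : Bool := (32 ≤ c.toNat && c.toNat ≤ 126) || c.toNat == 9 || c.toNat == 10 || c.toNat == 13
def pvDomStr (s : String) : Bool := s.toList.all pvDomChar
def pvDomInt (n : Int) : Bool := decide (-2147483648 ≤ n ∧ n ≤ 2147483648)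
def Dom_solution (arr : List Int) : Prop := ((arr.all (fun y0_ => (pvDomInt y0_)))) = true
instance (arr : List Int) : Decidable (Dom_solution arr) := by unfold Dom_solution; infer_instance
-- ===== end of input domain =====

-- B replaces A's left-to-right push/pop monotonic stack with one right-to-left
-- running-minimum scan (same O(n) cost, simpler).

-- ===== PORT A =====
-- A's while loop; the stack is kept head-as-top (Python appends/pops at the end),
-- so the final `stk` is returned reversed to bottom-to-top order.
def solutionLoop (arr : List Int) (stk : List Int) (i : Nat) : List Int :=
  if h : i < arr.length then
    match stk with
    | [] => solutionLoop arr [arr[i]] (i + 1)          -- len(stk)==0: append, i += 1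
    | t :: rest =>
      if arr[i] > t then solutionLoop arr (arr[i] :: t :: rest) (i + 1)  -- append, i += 1
      else solutionLoop arr rest i                     -- stk[-1] >= arr[i]: pop
  else stk
termination_by 2 * (arr.length - i) + stk.length
decreasing_by all_goals (simp only [List.length_cons, List.length_nil]; omega)

def solution (arr : List Int) : List Int := (solutionLoop arr [] 0).reverse

-- ===== PORT B =====
-- state = (out, cur_min); Python appends at the end of out
def solutionAltStep (st : List Int × Option Int) (x : Int) : List Int × Option Int :=
  match st.2 with
  | none => (st.1 ++ [x], some x)
  | some m => if x < m then (st.1 ++ [x], some x) else st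

def solution_alt (arr : List Int) : List Int :=
  ((arr.reverse.foldl solutionAltStep ([], none)).1).reverse

-- ===== PRECONDITION & SPEC =====
def Spec_solution (arr : List Int) (out : List Int) : Prop := out = solution_alt arr
instance (arr : List Int) (out : List Int) : Decidable (Spec_solution arr out) := by unfold Spec_solution; infer_instance

-- ===== CLAIM (what is proved, stated in full; the proofs are below) =====
def Claim_equal_solution : Prop := ∀ (arr : List Int), Dom_solution arr → Spec_solution arr (solution arr)

-- ===== LEMMAS AND PROOFS =====

-- the common mathematical object: strict suffix-minima of a list, increasing, head = min
def sufMin : List Int → List Int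
  | [] => []
  | x :: l =>
    match sufMin l with
    | [] => [x]
    | m :: t => if x < m then x :: m :: t else m :: t

theorem sufMin_min (s : List Int) :
    (s = [] ∧ sufMin s = []) ∨ (∃ m t, sufMin s = m :: t ∧ m ∈ s ∧ ∀ y ∈ s, m ≤ y) := by
  induction s with
  | nil => exact Or.inl ⟨rfl, rfl⟩
  | cons x l ih =>
    right
    rcases ih with ⟨_, hnil⟩ | ⟨m, t, hm, hmem, hle⟩
    · exact ⟨x, [], by simp [sufMin, hnil], by simp, by simp_all⟩
    · by_cases hx : x < m
      · refine ⟨x, m :: t, by simp [sufMin, hm, hx], by simp, ?_⟩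
        intro y hy
        rw [List.mem_cons] at hy
        rcases hy with hy | hy
        · omega
        · exact le_trans (le_of_lt hx) (hle y hy)
      · refine ⟨m, t, by simp [sufMin, hm, hx], by simp [hmem], ?_⟩
        intro y hy
        rw [List.mem_cons] at hy
        rcases hy with hy | hy
        · omega
        · exact hle y hy

theorem solutionAlt_fold (arr : List Int) :
    arr.reverse.foldl solutionAltStep ([], none) = ((sufMin arr).reverse, (sufMin arr).head?) := by
  induction arr with
  | nil => simp [sufMin]
  | cons x l ih =>
    rw [List.reverse_cons, List.foldl_append, ih]
    rcases sufMin_min l with ⟨_, hnil⟩ | ⟨m, t, hm, _, _⟩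
    · simp [sufMin, hnil, solutionAltStep]
    · by_cases hx : x < m
      · simp [sufMin, hm, hx, solutionAltStep]
      · simp [sufMin, hm, hx, solutionAltStep]

theorem solution_alt_eq (arr : List Int) : solution_alt arr = sufMin arr := by
  unfold solution_alt
  rw [solutionAlt_fold]
  simp

theorem dropWhile_congr' {A : Type} (p q : A → Bool) (l : List A)
    (h : ∀ x ∈ l, p x = q x) : l.dropWhile p = l.dropWhile q := by
  induction l with
  | nil => rfl
  | cons a l ih =>
    rw [List.dropWhile_cons, List.dropWhile_cons, h a (by simp)]
    split_ifs with hq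
    · exact ih (fun x hx => h x (by simp [hx]))
    · rfl

-- unfolding lemma for sufMin on a cons cell
theorem sufMin_cons (x : Int) (l : List Int) :
    sufMin (x :: l) = match sufMin l with
      | [] => [x]
      | m :: t => if x < m then x :: m :: t else m :: t := rfl

-- a stack element t is popped exactly when some remaining element is ≤ t
theorem solutionLoop_spec (arr stk : List Int) (i : Nat) :
    solutionLoop arr stk i =
      (sufMin (arr.drop i)).reverse ++
        stk.dropWhile (fun t => (arr.drop i).any (fun x => decide (x ≤ t))) := by
  induction stk, i using solutionLoop.induct arr with
  | case1 i h ih =>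
    rw [solutionLoop, dif_pos h]
    dsimp only
    rw [ih]
    have hdrop : arr.drop i = arr[i] :: arr.drop (i + 1) := List.drop_eq_getElem_cons h
    rw [hdrop, sufMin_cons]
    rcases sufMin_min (arr.drop (i+1)) with ⟨hnil, hsm⟩ | ⟨m, t, hm, hmem, hle⟩
    · rw [hsm]
      simp [hnil]
    · rw [hm]
      dsimp only
      by_cases hany : (arr.drop (i+1)).any (fun x => decide (x ≤ arr[i])) = true
      · have hnlt : ¬ arr[i] < m := by
          rcases List.any_eq_true.mp hany with ⟨x, hx, hxle⟩
          simp only [decide_eq_true_eq] at hxle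
          have := hle x hx; omega
        rw [if_neg hnlt]
        rw [List.dropWhile_cons, if_pos hany]
        simp
      · have hlt : arr[i] < m := by
          by_contra hc
          exact hany (List.any_eq_true.mpr ⟨m, hmem, by simp; omega⟩)
        rw [if_pos hlt]
        rw [List.dropWhile_cons, if_neg (by simpa using hany)]
        simp
  | case2 i h t rest hgt ih =>
    rw [solutionLoop, dif_pos h]
    dsimp only
    rw [if_pos hgt]
    rw [ih]
    have hdrop : arr.drop i = arr[i] :: arr.drop (i + 1) := List.drop_eq_getElem_cons h
    by_cases hany : (arr.drop (i+1)).any (fun x => decide (x ≤ arr[i])) = true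
    · rcases List.any_eq_true.mp hany with ⟨x0, hx0, hx0le⟩
      simp only [decide_eq_true_eq] at hx0le
      have hsm : sufMin (arr.drop i) = sufMin (arr.drop (i+1)) := by
        rcases sufMin_min (arr.drop (i+1)) with ⟨hnil, _⟩ | ⟨m, tl, hm, _, hle⟩
        · exact absurd hx0 (by simp [hnil])
        · have hnlt : ¬ arr[i] < m := by have := hle x0 hx0; omega
          rw [hdrop, sufMin_cons, hm]
          dsimp only
          rw [if_neg hnlt]
      rw [hsm]
      congr 1
      rw [List.dropWhile_cons, if_pos hany]
      apply dropWhile_congr'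
      intro a _
      by_cases h1 : (arr.drop (i+1)).any (fun x => decide (x ≤ a)) = true
      · rw [h1, hdrop]
        symm
        simp only [List.any_cons, Bool.or_eq_true]
        right
        exact h1
      · rw [Bool.not_eq_true] at h1
        rw [h1, hdrop]
        simp only [List.any_cons, h1, Bool.or_false]
        have : ¬ arr[i] ≤ a := by
          intro hc
          rw [Bool.eq_false_iff] at h1
          exact h1 (List.any_eq_true.mpr ⟨x0, hx0, by simp; omega⟩)
        simp [this]
    · have hall : ∀ y ∈ arr.drop (i+1), arr[i] < y := by
        intro y hy
        by_contra hc
        exact hany (List.any_eq_true.mpr ⟨y, hy, by simp; omega⟩)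
      have hsm : sufMin (arr.drop i) = arr[i] :: sufMin (arr.drop (i+1)) := by
        rcases sufMin_min (arr.drop (i+1)) with ⟨_, hnil⟩ | ⟨m, tl, hm, hmem, _⟩
        · rw [hdrop, sufMin_cons, hnil]
        · rw [hdrop, sufMin_cons, hm]
          dsimp only
          rw [if_pos (hall m hmem)]
      rw [hsm]
      rw [List.dropWhile_cons, if_neg (by simpa using hany)]
      rw [List.dropWhile_cons, if_neg ?hc]
      case hc =>
        rw [hdrop]
        simp only [List.any_cons, Bool.or_eq_true, decide_eq_true_eq, List.any_eq_true, not_or]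
        refine ⟨by omega, ?_⟩
        rintro ⟨y, hy, hyle⟩
        have := hall y hy; omega
      rw [List.reverse_cons, List.append_assoc]
      rfl
  | case3 i h t rest hle ih =>
    rw [solutionLoop, dif_pos h]
    dsimp only
    rw [if_neg hle]
    rw [ih]
    congr 1
    rw [List.dropWhile_cons, if_pos ?hp]
    case hp =>
      have hdrop : arr.drop i = arr[i] :: arr.drop (i + 1) := List.drop_eq_getElem_cons h
      rw [hdrop]
      simp only [List.any_cons, Bool.or_eq_true, decide_eq_true_eq]
      left; omega
  | case4 stk i h =>
    rw [solutionLoop, dif_neg h]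
    have hdrop : arr.drop i = [] := List.drop_eq_nil_of_le (by omega)
    rw [hdrop]
    cases stk <;> simp [sufMin]

-- ===== VERDICT (by name: the statement is the Claim_ definition above) =====
theorem solution_spec : Claim_equal_solution := by
  intro arr _
  unfold Spec_solution solution
  rw [solutionLoop_spec, solution_alt_eq]
  simp
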